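/- GENERATED by tools/from_farm_form.py from prooffarm-gif/accepted/DGifSlurp.8/Proof.lean (a worked proof of the farm's unit `DGifSlurp.8`,
   accepted by the verdict) — do not edit. -/
import Gif.Spec.Units.DGifSlurp_8
import Gif.Spec.AllSegs
import Gif.Spec.Proved.DGifSlurp_8_Lemmas

open X86 X86.User Asan ProgX.Base ProgX.Base.Spec Gif.Spec

/-!
  `DGifSlurp.8` (0x10a96a … 0x10a9c0 and 0x10a932 … 0x10a942, 28 instructions; dgif_lib.c:1243-1254): THE HEAD OF THE ROW LOOP of
  an interlaced image, a body segment of a protected function with a call in the middle. The return address 0x10a9a0 (`ret29`) of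
  `DGifGetLine` is not a cut of the design, so the unit makes it one of its own: the private assertion `seg8_AtRet29` (`IR` + the
  loop's registers + `j < Height` + the result) and two walks (Lemmas.lean), chained here:

      seg8_head     0x10a96a … the two checked loads, `DGifGetLine(gif, r + j · Width, Width)` … 0x10a9a0; or `Height ≤ j`: `i++`, to the
                    head of the pass loop 0x10a948
      seg8_tail     0x10a9a0 … GIF_ERROR: `DGifDecreaseImageCounter(gif)`, to the epilogue 0x10a8ed; GIF_OK: the checked load of
                    `InterlacedJumps[i]`, `j += …`, back to 0x10a96a with a smaller measure
-/

/-- Segment 8 of `DGifSlurp` takes `RowHead` at 0x10a96a to `RowHead` with a smaller measure, to `PassHead` with a smaller measure,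
or to the epilogue (`Exit`). -/
theorem Gif.Spec.Proved.DGifSlurp_8_ok : Gif.Spec.DGifSlurp_8.Statement := by
  intro Lay hLay μ hμ u₀ hcode h_asan_load4_noabort h_DGifGetLine h_DGifDecreaseImageCounter
  intro H rest frames F R Hc Fc m a b e ret v hat
  -- the callees' contracts for the present heap and forest and the frame list of the body (the own frame in front)
  have hgl := fun n => h_DGifGetLine Hc rest (DGifSlurp.framesIn frames e) Fc R n
  have hdec := fun init g => h_DGifDecreaseImageCounter Hc rest (DGifSlurp.framesIn frames e) Fc R init g
  -- 0x10a96a … the call of DGifGetLine … 0x10a9a0 (or to the pass head 0x10a948)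
  refine (Gif.Spec.DGifSlurp_8.seg8_head Lay hLay μ hμ u₀ hcode h_asan_load4_noabort H rest frames F R Hc Fc m a b e ret hgl v
    hat).trans ?_
  intro v1 hv1
  rcases hv1 with hpass | hret
  · -- 0x10a948: the pass is over
    exact ReachVia.done (Or.inr (Or.inl hpass))
  · -- 0x10a9a0 … 0x10a96a (the back edge) or 0x10a8ed (the error exit)
    refine (Gif.Spec.DGifSlurp_8.seg8_tail Lay hLay μ hμ u₀ hcode h_asan_load4_noabort H rest frames F R Hc Fc m a b e ret hdec v1
      hret).mono ?_
    intro v2 hv2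
    rcases hv2 with hrow | hexit
    · exact Or.inl hrow
    · exact Or.inr (Or.inr hexit)
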